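-- pv_equiv track=rewrite | github.com/RBaner/wordle-solver | main.py | best_possi
-- ===== SOURCE A (Python) =====
-- def score(word):
--     vowels = 'aeiou'
--     score = 0
--     for vowel in vowels:
--         if vowel in word.lower():
--             score += 1
--     return(score)
--
-- def best_possi(possi):
--     scores = {}
--     for word in possi:
--         if score(word) not in scores:
--             scores[score(word)] = [word]
--         else:
--             scores[score(word)].append(word)
--     return(scores[max(scores)])
-- ===== SOURCE B (Python) =====
-- def score(word):
--     vowels = 'aeiou'
--     score = 0
--     for vowel in vowels:
--         if vowel in word.lower():
--             score += 1
--     return(score)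
--
-- def best_possi(possi):
--     best = max(score(w) for w in possi)
--     return [w for w in possi if score(w) == best]
-- ===== Notes on version B (the rewrite author's own statement) =====
-- stated objective: simpler
-- what changed: Replaces the score->list grouping dictionary (build an index of all words by score, then select the bucket of the maximal key) by a direct compute-max-then-filter: one max over the scores, one filter over the words, no dict maintained.
import Mathlib
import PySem

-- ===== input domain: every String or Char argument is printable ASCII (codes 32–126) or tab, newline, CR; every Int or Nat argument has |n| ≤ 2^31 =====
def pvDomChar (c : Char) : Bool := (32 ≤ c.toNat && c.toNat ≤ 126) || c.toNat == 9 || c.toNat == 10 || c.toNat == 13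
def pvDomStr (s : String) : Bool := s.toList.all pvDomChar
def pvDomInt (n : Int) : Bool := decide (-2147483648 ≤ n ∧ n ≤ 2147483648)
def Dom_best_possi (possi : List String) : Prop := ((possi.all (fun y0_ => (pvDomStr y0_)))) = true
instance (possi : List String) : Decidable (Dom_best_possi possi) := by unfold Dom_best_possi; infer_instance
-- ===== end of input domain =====

-- B replaces A's score->bucket grouping dictionary by compute-max-then-filter (objective: simpler).

-- ===== PORT A =====
-- shared helper: Python's score(word) — identical in A and B
def scoreW (word : String) : Int :=
  "aeiou".toList.foldl
    (fun s v => if PySem.Chars.isIn [v] (PySem.Chars.lower word.toList) then s + 1 else s) 0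

def best_possi (possi : List String) : List String :=
  let scores := possi.foldl
    (fun d w =>
      if d.contains (scoreW w) = false then d.insert (scoreW w) [w]
      else d.modify (scoreW w) [] (fun l => l ++ [w]))
    PySem.Dict.empty
  -- max(scores) iterates the keys; scores[...] raises KeyError only on empty possi (excluded by Pre_)
  match PySem.List.max? scores.keys (fun x => x) with
  | some m => scores.getD m []
  | none => []

-- ===== PORT B =====
def best_possi_alt (possi : List String) : List String :=
  match PySem.List.max? (possi.map scoreW) (fun x => x) with
  | some best => possi.filter (fun w => scoreW w == best)
  | none => []

-- ===== PRECONDITION & SPEC =====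
-- Pre_ excludes only the empty list, on which A raises ValueError (max of an empty dict).
def Pre_best_possi (possi : List String) : Prop := possi ≠ []
instance (possi : List String) : Decidable (Pre_best_possi possi) := by unfold Pre_best_possi; infer_instance
def pvWitness_best_possi : List String := ["audio", "crane", "by"]

def Spec_best_possi (possi : List String) (out : List String) : Prop := out = best_possi_alt possi
instance (possi : List String) (out : List String) : Decidable (Spec_best_possi possi out) := by unfold Spec_best_possi; infer_instance

-- ===== CLAIM (what is proved, stated in full; the proofs are below) =====
def Claim_equal_best_possi : Prop := ∀ (possi : List String), Dom_best_possi possi → Pre_best_possi possi → Spec_best_possi possi (best_possi possi)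

-- ===== LEMMAS AND PROOFS =====

-- A's loop body is exactly 'd[score(w)] gets w appended (fresh key: new singleton bucket)'
lemma stepA_eq_modify (d : PySem.Dict Int (List String)) (w : String) :
    (if d.contains (scoreW w) = false then d.insert (scoreW w) [w]
     else d.modify (scoreW w) [] (fun l => l ++ [w]))
    = d.modify (scoreW w) [] (fun l => l ++ [w]) := by
  by_cases h : d.contains (scoreW w) = false
  · simp only [h, if_true]
    simp [PySem.Dict.modify, PySem.Dict.getD_of_not_contains d _ h]
  · simp [h]

-- A's whole loop is the modify-only grouping loop
lemma foldl_fun_eq (possi : List String) :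
    possi.foldl
      (fun d w =>
        if d.contains (scoreW w) = false then d.insert (scoreW w) [w]
        else d.modify (scoreW w) [] (fun l => l ++ [w]))
      PySem.Dict.empty
    = possi.foldl (fun d w => d.modify (scoreW w) [] (fun l => l ++ [w])) PySem.Dict.empty := by
  congr 1
  funext d w
  exact stepA_eq_modify d w

-- the grouping dict looked up at key c is the filter of possi by score c
lemma dict_getD (possi : List String) (c : Int) :
    (possi.foldl
      (fun d w =>
        if d.contains (scoreW w) = false then d.insert (scoreW w) [w]
        else d.modify (scoreW w) [] (fun l => l ++ [w]))
      PySem.Dict.empty).getD c []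
    = possi.filter (fun w => scoreW w == c) := by
  rw [foldl_fun_eq]
  have hm : (possi.map (fun w => (scoreW w, w))).foldl
      (fun d (p : Int × String) => d.modify p.1 [] (fun l => l ++ [p.2])) PySem.Dict.empty
      = possi.foldl (fun d w => d.modify (scoreW w) [] (fun l => l ++ [w])) PySem.Dict.empty :=
    by rw [List.foldl_map]
  rw [← hm, PySem.Dict.getD_foldl_modify_append]
  simp [PySem.Dict.getD_empty, List.filter_map, Function.comp_def]

-- the keys of the grouping dict are the distinct scores
lemma dict_keys (possi : List String) :
    (possi.foldl
      (fun d w =>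
        if d.contains (scoreW w) = false then d.insert (scoreW w) [w]
        else d.modify (scoreW w) [] (fun l => l ++ [w]))
      PySem.Dict.empty).keys
    = PySem.Set.ofList (possi.map scoreW) := by
  rw [foldl_fun_eq]
  rw [PySem.Dict.keys_foldl_modify_key possi scoreW [] (fun _ w => (fun l => l ++ [w])) PySem.Dict.empty]
  simp [PySem.Dict.keys_empty, PySem.Set.update, PySem.Set.ofList]

-- max over the deduplicated scores = max over all scores (same value)
lemma max_dedup (xs : List Int) (hxs : xs ≠ []) :
    PySem.List.max? (PySem.Set.ofList xs) (fun x => x) = PySem.List.max? xs (fun x => x) := by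
  cases hx : PySem.List.max? xs (fun x => x) with
  | none =>
    rw [PySem.List.max?_eq_none_iff] at hx
    exact absurd hx hxs
  | some a =>
    cases hd : PySem.List.max? (PySem.Set.ofList xs) (fun x => x) with
    | none =>
      rw [PySem.List.max?_eq_none_iff] at hd
      have ha : a ∈ xs := PySem.List.max?_mem hx
      have hmem : a ∈ PySem.Set.ofList xs := (PySem.Set.mem_ofList _ _).mpr ha
      rw [hd] at hmem
      simp at hmem
    | some b =>
      have ha : a ∈ xs := PySem.List.max?_mem hx
      have hb : b ∈ xs := (PySem.Set.mem_ofList _ _).mp (PySem.List.max?_mem hd)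
      have h1 : a ≤ b := PySem.List.max?_isMax hd a ((PySem.Set.mem_ofList _ _).mpr ha)
      have h2 : b ≤ a := PySem.List.max?_isMax hx b hb
      exact congrArg some (le_antisymm h2 h1)

-- ===== VERDICT (by name: the statement is the Claim_ definition above) =====
theorem best_possi_spec : Claim_equal_best_possi := by
  intro possi _ hpre
  unfold Spec_best_possi best_possi best_possi_alt
  simp only [dict_keys, dict_getD]
  rw [max_dedup _ (by simpa using hpre)]
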